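-- pv_equiv track=rewrite | github.com/TimLai666/usegolib | src/usegolib/builder/build.py | _mangle_type_for_symbol
-- ===== SOURCE A (Python) =====
-- def _mangle_type_for_symbol(t: str) -> str:
--     t = t.strip()
--     # Stable-ish mangling for type argument tokens.
--     t = t.replace("map[string]", "mapstr_")
--     t = t.replace("[]", "slice_")
--     t = t.replace("*", "ptr_")
--     for ch in ["/", ".", "[", "]", " ", "{", "}", ",", ":", ";", "(", ")", "<", ">", "|", "~", "&", "!"]:
--         t = t.replace(ch, "_")
--     while "__" in t:
--         t = t.replace("__", "_")
--     return t.strip("_") or "T"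
-- ===== SOURCE B (Python) =====
-- def _mangle_type_for_symbol(t: str) -> str:
--     t = t.strip()
--     t = t.replace("map[string]", "mapstr_")
--     t = t.replace("[]", "slice_")
--     t = t.replace("*", "ptr_")
--     specials = set("/.[] {},:;()<>|~&!")
--     out = []
--     prev_us = False
--     for c in t:
--         if c in specials or c == "_":
--             if not prev_us:
--                 out.append("_")
--             prev_us = True
--         else:
--             out.append(c)
--             prev_us = False
--     r = "".join(out).strip("_")
--     return r or "T"
-- ===== Notes on version B (the rewrite author's own statement) =====
-- stated objective: alternative
-- what changed: B replaces A's 18 sequential whole-string single-char replace passes and A's iterated whole-string collapse loop for doubled underscores with one left-to-right scan that maps special chars and underscores to a single underscore, skipping the emission when the previously emitted char was already an underscore.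
import Mathlib
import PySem

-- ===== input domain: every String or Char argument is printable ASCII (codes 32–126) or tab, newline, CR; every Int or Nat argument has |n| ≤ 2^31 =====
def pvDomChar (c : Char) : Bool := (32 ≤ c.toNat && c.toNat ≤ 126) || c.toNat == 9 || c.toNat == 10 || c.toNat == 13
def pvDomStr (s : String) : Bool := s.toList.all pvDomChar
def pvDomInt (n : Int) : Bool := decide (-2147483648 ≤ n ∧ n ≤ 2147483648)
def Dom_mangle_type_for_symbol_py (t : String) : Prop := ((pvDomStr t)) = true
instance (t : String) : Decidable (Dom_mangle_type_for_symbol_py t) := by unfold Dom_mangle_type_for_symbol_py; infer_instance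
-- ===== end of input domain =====

-- B fuses A's 18 single-char replacements and its iterated doubled-underscore collapse loop into one
-- left-to-right scan with a previous-output-was-underscore flag (objective: alternative decomposition; same three multi-char
-- preprocessing replacements, same final strip).

-- ===== PORT A =====
-- fuel-bounded transliteration of A's while-loop collapsing doubled underscores
-- (fuel = the string's length only makes the loop total; each firing iteration shrinks t)
def mangle_type_for_symbol_py_collapse : Nat → String → String
  | 0, t => t
  | fuel + 1, t =>
    if PySem.Str.isIn "__" t then
      mangle_type_for_symbol_py_collapse fuel (PySem.Str.replace t "__" "_")
    else t

def mangle_type_for_symbol_py (t : String) : String :=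
  let t1 := PySem.Str.strip t
  let t2 := PySem.Str.replace t1 "map[string]" "mapstr_"
  let t3 := PySem.Str.replace t2 "[]" "slice_"
  let t4 := PySem.Str.replace t3 "*" "ptr_"
  let t5 := (["/", ".", "[", "]", " ", "{", "}", ",", ":", ";", "(", ")", "<", ">", "|", "~", "&", "!"] : List String).foldl
      (fun s ch => PySem.Str.replace s ch "_") t4
  let t6 := mangle_type_for_symbol_py_collapse t5.toList.length t5
  let t7 := PySem.Str.stripChars t6 "_"
  if t7 = "" then "T" else t7

-- ===== PORT B =====
def pvSpecials : List Char :=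
  ['/', '.', '[', ']', ' ', '{', '}', ',', ':', ';', '(', ')', '<', '>', '|', '~', '&', '!']

-- B's single pass: a special char or underscore is emitted as an underscore only if the previous emitted char was not one
def pvScan : List Char → Bool → List Char
  | [], _ => []
  | c :: rest, prevU =>
    if pvSpecials.contains c || c = '_' then
      if prevU then pvScan rest true else '_' :: pvScan rest true
    else c :: pvScan rest false

def mangle_type_for_symbol_py_alt (t : String) : String :=
  let t1 := PySem.Str.strip t
  let t2 := PySem.Str.replace t1 "map[string]" "mapstr_"
  let t3 := PySem.Str.replace t2 "[]" "slice_"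
  let t4 := PySem.Str.replace t3 "*" "ptr_"
  let r := PySem.Str.stripChars (String.ofList (pvScan t4.toList false)) "_"
  if r = "" then "T" else r

-- ===== PRECONDITION & SPEC =====
def Spec_mangle_type_for_symbol_py (t : String) (out : String) : Prop := out = mangle_type_for_symbol_py_alt t
instance (t : String) (out : String) : Decidable (Spec_mangle_type_for_symbol_py t out) := by unfold Spec_mangle_type_for_symbol_py; infer_instance

-- ===== CLAIM (what is proved, stated in full; the proofs are below) =====
def Claim_equal_mangle_type_for_symbol_py : Prop := ∀ (t : String), Dom_mangle_type_for_symbol_py t → Spec_mangle_type_for_symbol_py t (mangle_type_for_symbol_py t)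

-- ===== LEMMAS AND PROOFS =====

-- char substitution applied by one single-char replace
def pvSubst (c x : Char) : Char := if x = c then '_' else x
-- the combined substitution of A's whole 18-element replace loop
def pvSubstAll (x : Char) : Char := if pvSpecials.contains x then '_' else x

-- structural form of replace l ['_','_'] ['_']
def pvRepl2 : List Char → List Char
  | [] => []
  | [c] => [c]
  | c :: d :: t => if c = '_' ∧ d = '_' then '_' :: pvRepl2 t else c :: pvRepl2 (d :: t)

-- underscore-run squasher (what pvScan computes after the character substitution)
def pvSq : List Char → Bool → List Char
  | [], _ => []
  | c :: r, b =>
    if c = '_' then (if b then pvSq r true else '_' :: pvSq r true)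
    else c :: pvSq r false

lemma pv_go_single (c : Char) : ∀ (fuel : Nat) (l acc : List Char), l.length ≤ fuel →
    PySem.Chars.replace.go [c] ['_'] fuel l acc = acc.reverse ++ l.map (pvSubst c) := by
  intro fuel
  induction fuel with
  | zero => intro l acc h; interval_cases hl : l.length <;> simp_all [PySem.Chars.replace.go, List.length_eq_zero_iff]
  | succ n ih =>
    intro l acc h
    cases l with
    | nil => simp [PySem.Chars.replace.go]
    | cons x t =>
      simp only [PySem.Chars.replace.go]
      by_cases hx : x = c
      · subst hx
        simp only [List.isPrefixOf, beq_self_eq_true, Bool.true_and, if_true,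
          List.length_singleton, List.drop_succ_cons, List.drop_zero]
        rw [ih t _ (by simpa using Nat.le_of_succ_le_succ h)]
        simp [pvSubst]
      · have hp : ([c].isPrefixOf (x :: t)) = false := by
          simp [List.isPrefixOf]
          intro hc; exact absurd hc.symm hx
        rw [hp]
        simp only [Bool.false_eq_true, if_false]
        rw [ih t _ (by simpa using Nat.le_of_succ_le_succ h)]
        simp [pvSubst, hx]

lemma pv_replace_single (l : List Char) (c : Char) :
    PySem.Chars.replace l [c] ['_'] = l.map (pvSubst c) := by
  rw [PySem.Chars.replace]
  simp only [List.isEmpty_cons, Bool.false_eq_true, if_false]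
  exact pv_go_single c l.length l [] le_rfl

lemma pv_go_double : ∀ (fuel : Nat) (l acc : List Char), l.length ≤ fuel →
    PySem.Chars.replace.go ['_', '_'] ['_'] fuel l acc = acc.reverse ++ pvRepl2 l := by
  intro fuel
  induction fuel with
  | zero => intro l acc h; interval_cases hl : l.length <;> simp_all [PySem.Chars.replace.go, List.length_eq_zero_iff, pvRepl2]
  | succ n ih =>
    intro l acc h
    match l with
    | [] => simp [PySem.Chars.replace.go, pvRepl2]
    | x :: t =>
      simp only [PySem.Chars.replace.go]
      by_cases hpre : (['_', '_'].isPrefixOf (x :: t)) = true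
      · rw [hpre]
        obtain ⟨t', rfl, rfl⟩ : ∃ t', x = '_' ∧ t = '_' :: t' := by
          cases t with
          | nil => simp [List.isPrefixOf] at hpre
          | cons y t' =>
            simp [List.isPrefixOf] at hpre
            exact ⟨t', hpre.1.symm, by rw [hpre.2.symm]⟩
        rw [ih _ _ (by simp at h ⊢; omega)]
        simp [pvRepl2]
      · rw [eq_false_of_ne_true hpre]
        simp only [Bool.false_eq_true, if_false]
        rw [ih t _ (by simpa using Nat.le_of_succ_le_succ h)]
        have hr : pvRepl2 (x :: t) = x :: pvRepl2 t := by
          cases t with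
          | nil => simp [pvRepl2]
          | cons d t' =>
            have hnd : ¬(x = '_' ∧ d = '_') := by
              rintro ⟨rfl, rfl⟩
              exact hpre (by simp [List.isPrefixOf])
            simp [pvRepl2, hnd]
        rw [hr]; simp

lemma pv_replace_double (l : List Char) :
    PySem.Chars.replace l ['_', '_'] ['_'] = pvRepl2 l := by
  rw [PySem.Chars.replace]
  simp only [List.isEmpty_cons, Bool.false_eq_true, if_false]
  exact pv_go_double l.length l [] le_rfl

-- B's scan is the squasher after the substitution
lemma pv_scan_eq_sq (l : List Char) : ∀ b, pvScan l b = pvSq (l.map pvSubstAll) b := by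
  induction l with
  | nil => intro b; simp [pvScan, pvSq]
  | cons c t ih =>
    intro b
    by_cases hc : c ∈ pvSpecials
    · have h1 : pvSubstAll c = '_' := by simp [pvSubstAll, hc]
      simp [pvScan, pvSq, hc, h1, ih]
    · by_cases hu : c = '_'
      · subst hu
        simp [pvScan, pvSq, pvSubstAll, hc, ih]
      · have h1 : pvSubstAll c = c := by simp [pvSubstAll, hc]
        simp [pvScan, pvSq, hc, hu, h1, ih]

-- squashing is invariant under one global doubled-underscore replacement pass
lemma pv_sq_repl2 (l : List Char) : ∀ b, pvSq (pvRepl2 l) b = pvSq l b := by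
  induction l using pvRepl2.induct with
  | case1 => intro b; simp [pvRepl2]
  | case2 c => intro b; simp [pvRepl2]
  | case3 c d t h ih =>
    obtain ⟨rfl, rfl⟩ := h
    intro b
    simp only [pvRepl2]
    cases b <;> simp [pvSq, ih]
  | case4 c d t h ih =>
    intro b
    simp only [pvRepl2, if_neg h]
    by_cases hc : c = '_' <;> cases b <;> simp [pvSq, hc, ih]

lemma pv_sq_true_eq (l : List Char) (h : l.head? ≠ some '_') : pvSq l true = pvSq l false := by
  cases l with
  | nil => rfl
  | cons c t =>
    have : c ≠ '_' := by simpa using h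
    simp [pvSq, this]

-- with no "__" inside, the squasher is the identity
lemma pv_sq_id : ∀ (l : List Char), ¬ ['_', '_'] <:+: l → pvSq l false = l := by
  intro l
  induction l with
  | nil => intro _; rfl
  | cons c t ih =>
    intro h
    have ht : ¬ ['_', '_'] <:+: t := fun hi => h (hi.trans (List.suffix_cons c t).isInfix)
    by_cases hc : c = '_'
    · subst hc
      have hh : t.head? ≠ some '_' := by
        intro hs
        cases t with
        | nil => simp at hs
        | cons d t' =>
          simp at hs
          subst hs
          exact h ⟨[], t', by simp⟩
      simp only [pvSq, if_true]
      rw [pv_sq_true_eq t hh, ih ht]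
      simp
    · simp only [pvSq, if_neg hc]
      rw [ih ht]

lemma pv_repl2_length_le : ∀ (l : List Char), (pvRepl2 l).length ≤ l.length := by
  intro l
  induction l using pvRepl2.induct with
  | case1 => simp [pvRepl2]
  | case2 c => simp [pvRepl2]
  | case3 c d t h ih => obtain ⟨rfl, rfl⟩ := h; simp [pvRepl2]; omega
  | case4 c d t h ih => simp [pvRepl2, if_neg h] at ih ⊢; omega

lemma pv_repl2_length_lt : ∀ (l : List Char), ['_', '_'] <:+: l → (pvRepl2 l).length < l.length := by
  intro l
  induction l using pvRepl2.induct with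
  | case1 => intro h; have := h.length_le; simp at this
  | case2 c => intro h; have := h.length_le; simp at this
  | case3 c d t h ih =>
    obtain ⟨rfl, rfl⟩ := h
    intro _
    have := pv_repl2_length_le t
    simp [pvRepl2]; omega
  | case4 c d t h ih =>
    intro hi
    have hdt : ['_', '_'] <:+: d :: t := by
      rcases (List.infix_cons_iff.mp hi) with hp | hs
      · exfalso
        rcases hp with ⟨r, hr⟩
        apply h
        cases hr
        exact ⟨rfl, rfl⟩
      · exact hs
    have := ih hdt
    simp [pvRepl2, if_neg h]
    simpa using this

-- the fuel-bounded collapse loop computes the squasher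
lemma pv_collapse_eq : ∀ (fuel : Nat) (s : String), s.toList.length ≤ fuel →
    (mangle_type_for_symbol_py_collapse fuel s).toList = pvSq s.toList false := by
  intro fuel
  induction fuel with
  | zero =>
    intro s h
    have : s.toList = [] := List.length_eq_zero_iff.mp (Nat.le_zero.mp h)
    simp [mangle_type_for_symbol_py_collapse, this, pvSq]
  | succ n ih =>
    intro s h
    simp only [mangle_type_for_symbol_py_collapse]
    by_cases hin : PySem.Str.isIn "__" s = true
    · have hinf : ['_', '_'] <:+: s.toList := by
        have := (PySem.Str.isIn_iff_infix "__" s).mp hin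
        simpa using this
      rw [if_pos hin]
      have htl : (PySem.Str.replace s "__" "_").toList = pvRepl2 s.toList := by
        rw [PySem.Str.toList_replace]
        have h1 : ("__" : String).toList = ['_', '_'] := rfl
        have h2 : ("_" : String).toList = ['_'] := rfl
        rw [h1, h2, pv_replace_double]
      have hlen : (PySem.Str.replace s "__" "_").toList.length ≤ n := by
        rw [htl]
        have := pv_repl2_length_lt s.toList hinf
        omega
      rw [ih _ hlen, htl, pv_sq_repl2]
    · rw [if_neg hin]
      have hninf : ¬ ['_', '_'] <:+: s.toList := by
        intro hinf
        exact hin ((PySem.Str.isIn_iff_infix "__" s).mpr (by simpa using hinf))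
      exact (pv_sq_id s.toList hninf).symm

-- the 18-step replace loop is one map
lemma pv_charfold : ∀ (cs : List Char) (l : List Char),
    cs.foldl (fun u c => u.map (pvSubst c)) l = l.map (fun x => if cs.contains x then '_' else x) := by
  intro cs
  induction cs with
  | nil => intro l; simp
  | cons c cs ih =>
    intro l
    simp only [List.foldl_cons]
    rw [ih, List.map_map]
    apply List.map_congr_left
    intro x _
    by_cases hx : x = c
    · subst hx; simp [pvSubst]
    · simp [pvSubst, hx]

lemma pv_strfold (u : String) :
    ((["/", ".", "[", "]", " ", "{", "}", ",", ":", ";", "(", ")", "<", ">", "|", "~", "&", "!"] : List String).foldl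
      (fun s ch => PySem.Str.replace s ch "_") u).toList = u.toList.map pvSubstAll := by
  have h := pv_charfold pvSpecials u.toList
  simp only [pvSpecials, List.foldl] at h
  simp only [List.foldl, PySem.Str.toList_replace,
    (show ("/" : String).toList = ['/'] from rfl), (show ("." : String).toList = ['.'] from rfl),
    (show ("[" : String).toList = ['['] from rfl), (show ("]" : String).toList = [']'] from rfl),
    (show (" " : String).toList = [' '] from rfl), (show ("{" : String).toList = ['{'] from rfl),
    (show ("}" : String).toList = ['}'] from rfl), (show ("," : String).toList = [','] from rfl),
    (show (":" : String).toList = [':'] from rfl), (show (";" : String).toList = [';'] from rfl),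
    (show ("(" : String).toList = ['('] from rfl), (show (")" : String).toList = [')'] from rfl),
    (show ("<" : String).toList = ['<'] from rfl), (show (">" : String).toList = ['>'] from rfl),
    (show ("|" : String).toList = ['|'] from rfl), (show ("~" : String).toList = ['~'] from rfl),
    (show ("&" : String).toList = ['&'] from rfl), (show ("!" : String).toList = ['!'] from rfl),
    (show ("_" : String).toList = ['_'] from rfl), pv_replace_single]
  exact h.trans rfl

-- ===== VERDICT (by name: the statement is the Claim_ definition above) =====
theorem mangle_type_for_symbol_py_spec : Claim_equal_mangle_type_for_symbol_py := by
  intro t _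
  unfold Spec_mangle_type_for_symbol_py mangle_type_for_symbol_py mangle_type_for_symbol_py_alt
  simp only []
  set t4 := PySem.Str.replace (PySem.Str.replace (PySem.Str.replace (PySem.Str.strip t) "map[string]" "mapstr_") "[]" "slice_") "*" "ptr_" with ht4
  set t5 := (["/", ".", "[", "]", " ", "{", "}", ",", ":", ";", "(", ")", "<", ">", "|", "~", "&", "!"] : List String).foldl
      (fun s ch => PySem.Str.replace s ch "_") t4 with ht5
  have key : mangle_type_for_symbol_py_collapse t5.toList.length t5
      = String.ofList (pvScan t4.toList false) := by
    apply String.toList_inj.mp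
    rw [pv_collapse_eq t5.toList.length t5 le_rfl]
    rw [pv_scan_eq_sq]
    rw [show t5.toList = t4.toList.map pvSubstAll from pv_strfold t4]
    simp
  rw [key]
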